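-- pv_equiv track=rewrite | github.com/tsinampoizina/CR4D_project | climatology wet days frequency CORDEX general.py | month_start_end
-- ===== SOURCE A (Python) =====
-- def month_start_end(year):
--     month_lengths = [0,31,28,31,30,31,30,31,31,30,31,30,31]
--     if year in [1964, 1968, 1972, 1976, 1980, 1984, 1988, 1992, 1996, 2000,
--                     2004, 2008, 2012, 2016, 2020]:
--         month_lengths[2] = 29
--     month_start_end_list = [(0,1)]
--     for mo in range(1,13):
--         s,e = month_start_end_list[-1]
--         month_start_end_list.append((e, e + month_lengths[mo]-1))
--     return month_start_end_list
-- ===== SOURCE B (Python) =====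
-- _LEAP_YEARS = frozenset([1964, 1968, 1972, 1976, 1980, 1984, 1988, 1992, 1996,
--                          2000, 2004, 2008, 2012, 2016, 2020])
--
-- _TABLE_LEAP = [(0, 1), (1, 31), (31, 59), (59, 89), (89, 118), (118, 148),
--                (148, 177), (177, 207), (207, 237), (237, 266), (266, 296),
--                (296, 325), (325, 355)]
--
-- _TABLE_COMMON = [(0, 1), (1, 31), (31, 58), (58, 88), (88, 117), (117, 147),
--                  (147, 176), (176, 206), (206, 236), (236, 265), (265, 295),
--                  (295, 324), (324, 354)]
--
-- def month_start_end(year):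
--     # The calendar is fixed, so the answer is one of two constant tables.
--     return list(_TABLE_LEAP if year in _LEAP_YEARS else _TABLE_COMMON)
-- ===== Notes on version B (the rewrite author's own statement) =====
-- stated objective: simpler
-- what changed: B replaces A's tuple-chaining loop over month lengths by a direct lookup of one of two precomputed constant boundary tables (leap vs non-leap), eliminating the loop entirely.
import Mathlib
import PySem

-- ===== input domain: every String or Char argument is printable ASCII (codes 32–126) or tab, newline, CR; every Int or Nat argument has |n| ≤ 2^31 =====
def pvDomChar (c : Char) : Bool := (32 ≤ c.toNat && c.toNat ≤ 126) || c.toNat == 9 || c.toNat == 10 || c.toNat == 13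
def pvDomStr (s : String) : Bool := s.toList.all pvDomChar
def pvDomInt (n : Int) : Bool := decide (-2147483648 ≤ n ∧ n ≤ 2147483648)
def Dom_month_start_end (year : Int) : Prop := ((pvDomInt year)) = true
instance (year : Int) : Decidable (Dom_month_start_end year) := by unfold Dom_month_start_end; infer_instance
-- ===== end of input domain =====

-- B replaces the tuple-chaining loop by a lookup of one of two precomputed constant boundary tables (simpler).


-- ===== PORT A =====
def month_start_end (year : Int) : List (Int × Int) :=
  let month_lengths : List Int := [0,31,28,31,30,31,30,31,31,30,31,30,31]
  let month_lengths :=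
    if year ∈ ([1964, 1968, 1972, 1976, 1980, 1984, 1988, 1992, 1996, 2000,
                2004, 2008, 2012, 2016, 2020] : List Int)
    then month_lengths.set 2 29 else month_lengths
  (PySem.List.pyRange 1 13 1).foldl (fun acc mo =>
    -- s,e = month_start_end_list[-1]; indices are always in range, so getD's default is never used
    let se := (PySem.List.pyGet? acc (-1)).getD (0, 0)
    acc ++ [(se.2, se.2 + (PySem.List.pyGet? month_lengths mo).getD 0 - 1)]) [(0, 1)]

-- ===== PORT B =====
-- leap-year membership set (PySem.Set, as in Source B's frozenset)
def pvLeapYears : PySem.Set Int :=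
  PySem.Set.ofList [1964, 1968, 1972, 1976, 1980, 1984, 1988, 1992, 1996,
                    2000, 2004, 2008, 2012, 2016, 2020]

def pvTableLeap : List (Int × Int) :=
  [(0, 1), (1, 31), (31, 59), (59, 89), (89, 118), (118, 148),
   (148, 177), (177, 207), (207, 237), (237, 266), (266, 296),
   (296, 325), (325, 355)]

def pvTableCommon : List (Int × Int) :=
  [(0, 1), (1, 31), (31, 58), (58, 88), (88, 117), (117, 147),
   (147, 176), (176, 206), (206, 236), (236, 265), (265, 295),
   (295, 324), (324, 354)]

def month_start_end_alt (year : Int) : List (Int × Int) :=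
  if PySem.Set.contains pvLeapYears year then pvTableLeap else pvTableCommon

-- ===== PRECONDITION & SPEC =====
def Spec_month_start_end (year : Int) (out : List (Int × Int)) : Prop := out = month_start_end_alt year
instance (year : Int) (out : List (Int × Int)) : Decidable (Spec_month_start_end year out) := by unfold Spec_month_start_end; infer_instance

-- ===== CLAIM =====
def Claim_equal_month_start_end : Prop := ∀ (year : Int), Dom_month_start_end year → Spec_month_start_end year (month_start_end year)

-- ===== LEMMAS AND PROOFS =====
theorem pvMem_iff (year : Int) :
    (PySem.Set.contains pvLeapYears year = true) ↔
    year ∈ ([1964, 1968, 1972, 1976, 1980, 1984, 1988, 1992, 1996, 2000,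
             2004, 2008, 2012, 2016, 2020] : List Int) := by
  simp [pvLeapYears, PySem.Set.contains]

-- ===== VERDICT =====
theorem month_start_end_spec : Claim_equal_month_start_end := by
  intro year _
  unfold Spec_month_start_end month_start_end month_start_end_alt
  by_cases h : year ∈ ([1964, 1968, 1972, 1976, 1980, 1984, 1988, 1992, 1996, 2000,
                        2004, 2008, 2012, 2016, 2020] : List Int)
  · rw [if_pos ((pvMem_iff year).mpr h)]
    simp only [if_pos h]
    decide
  · rw [if_neg (fun hc => h ((pvMem_iff year).mp hc))]
    simp only [if_neg h]
    decide
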